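-- pv_equiv track=rewrite | github.com/acarrasco/advent_of_code | 2021/day18/part2_str.py | exp_left
-- ===== SOURCE A (Python) =====
-- def exp_left(sn, v):
--     pad = sn[-1] == '[' and '0' or ''
--     for i in range(len(sn)-1, -1, -1):
--         if sn[i].isdigit():
--             j = i
--             while sn[j].isdigit():
--                 j -= 1
--             return sn[:j+1] + str(int(sn[j+1:i+1])+int(v)) + sn[i+1:] + pad
--     return sn + '0'
-- ===== SOURCE B (Python) =====
-- def exp_left(sn, v):
--     pad = '0' if sn[-1] == '[' else ''
--     start = None
--     last = None
--     for k, c in enumerate(sn):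
--         if c.isdigit():
--             if start is None:
--                 start = k
--         else:
--             if start is not None:
--                 last = (start, k)
--                 start = None
--     if start is not None:
--         last = (start, len(sn))
--     if last is None:
--         return sn + '0'
--     i, j = last
--     return sn[:i] + str(int(sn[i:j]) + int(v)) + sn[j:] + pad
-- ===== Notes on version B (the rewrite author's own statement) =====
-- stated objective: alternative
-- what changed: Replaces A's backward index scan with an inner negative-wrapping while-walk by a single forward pass over enumerate(sn) that tracks the start of the current digit run and the span of the last completed run, then splices once.
-- outside the precondition, e.g. on exp_left('', '3'): A raises IndexError, B raises IndexError; on exp_left('12', 'x'): A raises IndexError, B raises ValueError; on exp_left('[1,2]', 'x'): A raises ValueError, B raises ValueError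
import Mathlib
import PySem

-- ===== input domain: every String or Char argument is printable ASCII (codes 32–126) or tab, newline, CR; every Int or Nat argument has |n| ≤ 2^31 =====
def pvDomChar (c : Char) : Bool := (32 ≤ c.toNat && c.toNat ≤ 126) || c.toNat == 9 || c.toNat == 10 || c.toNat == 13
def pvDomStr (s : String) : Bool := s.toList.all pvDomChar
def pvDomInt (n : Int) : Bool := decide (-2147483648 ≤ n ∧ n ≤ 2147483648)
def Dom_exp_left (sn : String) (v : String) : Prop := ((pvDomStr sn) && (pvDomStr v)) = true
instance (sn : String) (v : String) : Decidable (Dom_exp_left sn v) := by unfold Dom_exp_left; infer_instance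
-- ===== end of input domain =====

-- B replaces A's backward scan (with its inner negative-wrapping while-walk) by one forward
-- pass tracking the last completed digit run; equivalence is about the return value only.

-- ===== PORT A =====
-- inner 'while sn[j].isdigit(): j -= 1': pyGet? mirrors Python's negative-index wraparound;
-- fuel exhaustion / a none (IndexError) only happen outside Pre_, where we just stop.
def expLeftWhile (cs : List Char) : Nat → Int → Int
  | 0, j => j
  | fuel+1, j =>
    match PySem.List.pyGet? cs j with
    | none => j
    | some c => if PySem.Chars.isdigit c then expLeftWhile cs fuel (j-1) else j

-- 'for i in range(len(sn)-1, -1, -1)': n = i+1 (n = 0 means the loop is exhausted)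
def expLeftLoop (cs : List Char) (v : String) (pad : List Char) : Nat → List Char
  | 0 => cs ++ ['0']
  | n+1 =>
    if PySem.Chars.isdigit (cs.getD n ' ') then
      let j : Int := expLeftWhile cs (cs.length + n + 2) (n : Int)
      PySem.List.slice cs none (some (j+1))
        ++ PySem.Int.toChars ((PySem.Int.ofStr? (String.mk (PySem.List.slice cs (some (j+1)) (some ((n : Int)+1))))).getD 0
            + (PySem.Int.ofStr? v).getD 0)
        ++ PySem.List.slice cs (some ((n : Int)+1)) none ++ pad
    else expLeftLoop cs v pad n

def exp_left (sn : String) (v : String) : String :=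
  let cs := sn.toList
  let pad : List Char := if PySem.List.pyGet? cs (-1) = some '[' then ['0'] else []
  String.mk (expLeftLoop cs v pad cs.length)

-- ===== PORT B =====
-- 'for k, c in enumerate(sn)' tracking (start, last); at the end flush a pending run.
def expLeftScan : List Char → Nat → Option Nat → Option (Nat × Nat) → Option (Nat × Nat)
  | [], k, start, last =>
    match start with
    | some s => some (s, k)
    | none => last
  | c :: rest, k, start, last =>
    if PySem.Chars.isdigit c then
      expLeftScan rest (k+1) (some (start.getD k)) last
    else
      expLeftScan rest (k+1) none
        (match start with
         | some s => some (s, k)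
         | none => last)

def exp_left_alt (sn : String) (v : String) : String :=
  let cs := sn.toList
  let pad : List Char := if PySem.List.pyGet? cs (-1) = some '[' then ['0'] else []
  match expLeftScan cs 0 none none with
  | none => String.mk (cs ++ ['0'])
  | some (i, j) =>
      String.mk (cs.take i
        ++ PySem.Int.toChars ((PySem.Int.ofStr? (String.mk ((cs.drop i).take (j - i)))).getD 0
            + (PySem.Int.ofStr? v).getD 0)
        ++ cs.drop j ++ pad)

-- ===== PRECONDITION & SPEC =====
-- Pre_ excludes exactly the inputs where the Python A raises: empty sn (IndexError on sn[-1]),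
-- all-digit sn (the inner while-walk wraps past the end: IndexError), and a non-int-like v
-- when sn contains a digit (ValueError from int(v)).
def Pre_exp_left (sn : String) (v : String) : Prop :=
  sn.toList ≠ [] ∧ ¬ (sn.toList.all PySem.Chars.isdigit = true) ∧
    (sn.toList.any PySem.Chars.isdigit = true → (PySem.Int.ofStr? v).isSome = true)
instance (sn : String) (v : String) : Decidable (Pre_exp_left sn v) := by
  unfold Pre_exp_left; infer_instance

def pvWitness_exp_left : String × String := ("[[1,2],3]", "10")

def Spec_exp_left (sn : String) (v : String) (out : String) : Prop := out = exp_left_alt sn v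
instance (sn : String) (v : String) (out : String) : Decidable (Spec_exp_left sn v out) := by
  unfold Spec_exp_left; infer_instance

-- ===== CLAIM (what is proved, stated in full; the proofs are below) =====
def Claim_equal_exp_left : Prop := ∀ (sn : String) (v : String), Dom_exp_left sn v → Pre_exp_left sn v → Spec_exp_left sn v (exp_left sn v)

-- ===== LEMMAS AND PROOFS =====

-- A's outer loop skips an index interval of non-digits
theorem loop_skip (cs : List Char) (v : String) (pad : List Char) (m : Nat) :
    ∀ n, m ≤ n → (∀ i, m ≤ i → i < n → PySem.Chars.isdigit (cs.getD i ' ') = false) →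
    expLeftLoop cs v pad n = expLeftLoop cs v pad m := by
  intro n
  induction n with
  | zero =>
    intro h _
    obtain rfl : m = 0 := Nat.le_zero.mp h
    rfl
  | succ n ih =>
    intro hmn hnd
    rcases Nat.eq_or_lt_of_le hmn with h | h
    · exact h ▸ rfl
    · have hd := hnd n (by omega) (by omega)
      rw [expLeftLoop, hd]
      simp only [Bool.false_eq_true, if_false]
      exact ih (by omega) (fun i h1 h2 => hnd i h1 (by omega))

-- the inner while-walk steps down through n digits and stops
theorem while_walk (cs : List Char) :
    ∀ (n : Nat) (fuel : Nat) (j : Int), n < fuel →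
    (∀ m : Nat, m < n → ∃ c, PySem.List.pyGet? cs (j - m) = some c ∧ PySem.Chars.isdigit c = true) →
    (∀ c, PySem.List.pyGet? cs (j - n) = some c → PySem.Chars.isdigit c = false) →
    expLeftWhile cs fuel j = j - n := by
  intro n
  induction n with
  | zero =>
    intro fuel j hf _ hstop
    obtain ⟨f, rfl⟩ : ∃ f, fuel = f + 1 := ⟨fuel - 1, by omega⟩
    rw [expLeftWhile]
    cases hg : PySem.List.pyGet? cs j with
    | none => simp
    | some c => have := hstop c (by simpa using hg); simp [this]
  | succ n ih =>
    intro fuel j hf hdig hstop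
    obtain ⟨f, rfl⟩ : ∃ f, fuel = f + 1 := ⟨fuel - 1, by omega⟩
    obtain ⟨c, hg, hc⟩ := hdig 0 (by omega)
    simp only [Nat.cast_zero, sub_zero] at hg
    rw [expLeftWhile, hg]
    simp only [hc, if_true]
    have := ih f (j - 1) (by omega)
      (fun m hm => by
        have := hdig (m+1) (by omega)
        simpa [sub_sub, add_comm] using this)
      (fun c hc => by
        apply hstop c
        have : j - 1 - (n : Int) = j - ((n : Nat) + 1 : Nat) := by push_cast; ring
        rwa [this] at hc)
    rw [this]; push_cast; ring

-- B's scan: a block of non-digits with no pending run is inert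
theorem scan_nodigit (t : List Char) (ht : ∀ c ∈ t, PySem.Chars.isdigit c = false) :
    ∀ (k : Nat) (last : Option (Nat × Nat)), expLeftScan t k none last = last := by
  induction t with
  | nil => intro k last; rfl
  | cons c t ih =>
    intro k last
    rw [expLeftScan]
    simp [ht c (by simp), ih (fun x hx => ht x (by simp [hx]))]

-- B's scan: a pending run flushes at the first non-digit (or at the end)
theorem scan_flush (t : List Char) (ht : ∀ c ∈ t, PySem.Chars.isdigit c = false)
    (k s : Nat) (last : Option (Nat × Nat)) :
    expLeftScan t k (some s) last = some (s, k) := by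
  cases t with
  | nil => rfl
  | cons c t =>
    rw [expLeftScan]
    simp [ht c (by simp), scan_nodigit t (fun x hx => ht x (by simp [hx]))]

-- B's scan: a digit block extends the pending run
theorem scan_digits (d : List Char) (hd : ∀ c ∈ d, PySem.Chars.isdigit c = true) :
    ∀ (ys : List Char) (k s : Nat) (last : Option (Nat × Nat)),
    expLeftScan (d ++ ys) k (some s) last = expLeftScan ys (k + d.length) (some s) last := by
  induction d with
  | nil => intro ys k s last; simp
  | cons c d ih =>
    intro ys k s last
    rw [List.cons_append, expLeftScan]
    simp only [hd c (by simp), if_true, Option.getD_some]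
    rw [ih (fun x hx => hd x (by simp [hx]))]
    congr 1
    simp; omega

theorem scan_digits_start (d : List Char) (hne : d ≠ [])
    (hd : ∀ c ∈ d, PySem.Chars.isdigit c = true)
    (ys : List Char) (k : Nat) (last : Option (Nat × Nat)) :
    expLeftScan (d ++ ys) k none last = expLeftScan ys (k + d.length) (some k) last := by
  cases d with
  | nil => exact absurd rfl hne
  | cons c d =>
    rw [List.cons_append, expLeftScan]
    simp only [hd c (by simp), if_true, Option.getD_none]
    rw [scan_digits d (fun x hx => hd x (by simp [hx]))]
    congr 1
    simp; omega

-- B's scan: a block ending in a non-digit leaves no pending run (any entry state)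
theorem scan_prefix (u : List Char) :
    ∀ (hne : u ≠ []), PySem.Chars.isdigit (u.getLast hne) = false →
    ∀ (ys : List Char) (k : Nat) (st : Option Nat) (last : Option (Nat × Nat)),
    ∃ l', expLeftScan (u ++ ys) k st last = expLeftScan ys (k + u.length) none l' := by
  induction u with
  | nil => intro hne; exact absurd rfl hne
  | cons c u ih =>
    intro hne hlast ys k st last
    cases hu : u with
    | nil =>
      subst hu
      simp only [List.getLast_singleton] at hlast
      cases st with
      | none => exact ⟨last, by rw [List.cons_append, expLeftScan, hlast]; simp⟩
      | some s => exact ⟨some (s, k), by rw [List.cons_append, expLeftScan, hlast]; simp⟩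
    | cons c' u' =>
      have hu' : u ≠ [] := by rw [hu]; simp
      have hlast' : PySem.Chars.isdigit (u.getLast hu') = false := by
        rw [← hlast]; congr 1
        rw [List.getLast_cons hu']
      by_cases hc : PySem.Chars.isdigit c = true
      · cases st with
        | none =>
          obtain ⟨l2, h2⟩ := ih hu' hlast' ys (k+1) (some k) last
          refine ⟨l2, ?_⟩
          rw [← hu, List.cons_append, expLeftScan]
          simp only [hc, if_true, Option.getD_none]
          rw [h2]; congr 1; simp; omega
        | some s =>
          obtain ⟨l2, h2⟩ := ih hu' hlast' ys (k+1) (some s) last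
          refine ⟨l2, ?_⟩
          rw [← hu, List.cons_append, expLeftScan]
          simp only [hc, if_true, Option.getD_some]
          rw [h2]; congr 1; simp; omega
      · have hcf : PySem.Chars.isdigit c = false := by simpa using hc
        cases st with
        | none =>
          obtain ⟨l2, h2⟩ := ih hu' hlast' ys (k+1) none last
          refine ⟨l2, ?_⟩
          rw [← hu, List.cons_append, expLeftScan]
          simp only [hcf, Bool.false_eq_true, if_false]
          rw [h2]; congr 1; simp; omega
        | some s =>
          obtain ⟨l2, h2⟩ := ih hu' hlast' ys (k+1) none (some (s, k))
          refine ⟨l2, ?_⟩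
          rw [← hu, List.cons_append, expLeftScan]
          simp only [hcf, Bool.false_eq_true, if_false]
          rw [h2]; congr 1; simp; omega

-- B's scan over the decomposition u ++ d ++ t finds the run (u.length, u.length + d.length)
theorem scan_value (u d t : List Char) (hdne : d ≠ [])
    (hdall : ∀ c ∈ d, PySem.Chars.isdigit c = true)
    (ht : ∀ c ∈ t, PySem.Chars.isdigit c = false)
    (hu : ∀ h : u ≠ [], PySem.Chars.isdigit (u.getLast h) = false) :
    expLeftScan (u ++ (d ++ t)) 0 none none = some (u.length, u.length + d.length) := by
  by_cases huni : u = []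
  · subst huni
    rw [List.nil_append, scan_digits_start d hdne hdall t 0 none,
      scan_flush t ht (0 + d.length) 0 none]
    simp
  · obtain ⟨l', hl'⟩ := scan_prefix u huni (hu huni) (d ++ t) 0 none none
    rw [hl', scan_digits_start d hdne hdall t (0 + u.length) l',
      scan_flush t ht (0 + u.length + d.length) (0 + u.length) l']
    simp

-- A's loop over the decomposition u ++ d ++ t returns the spliced string
theorem loop_value (u d t : List Char) (v : String) (pad : List Char) (hdne : d ≠ [])
    (hdall : ∀ c ∈ d, PySem.Chars.isdigit c = true)
    (ht : ∀ c ∈ t, PySem.Chars.isdigit c = false)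
    (hu : ∀ h : u ≠ [], PySem.Chars.isdigit (u.getLast h) = false)
    (hnall : ¬ ((u ++ (d ++ t)).all PySem.Chars.isdigit = true)) :
    expLeftLoop (u ++ (d ++ t)) v pad (u ++ (d ++ t)).length =
      u ++ PySem.Int.toChars ((PySem.Int.ofStr? (String.mk d)).getD 0
            + (PySem.Int.ofStr? v).getD 0) ++ t ++ pad := by
  set cs := u ++ (d ++ t) with hcs
  have hlen : cs.length = u.length + d.length + t.length := by simp [hcs]; omega
  have hdpos : 0 < d.length := List.length_pos_of_ne_nil hdne
  -- indices in the d-region are digits, read through getElem?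
  have hdig_at : ∀ i : Nat, u.length ≤ i → i < u.length + d.length →
      ∃ c, cs[i]? = some c ∧ PySem.Chars.isdigit c = true := by
    intro i h1 h2
    have hi : i - u.length < d.length := by omega
    have : cs[i]? = d[i - u.length]? := by
      rw [hcs, List.getElem?_append_right h1, List.getElem?_append_left hi]
    exact ⟨d[i - u.length]'hi, by rw [this]; simp, hdall _ (List.getElem_mem hi)⟩
  have ht_at : ∀ i : Nat, u.length + d.length ≤ i → i < cs.length →
      PySem.Chars.isdigit (cs.getD i ' ') = false := by
    intro i h1 h2
    have h1' : (u ++ d).length ≤ i := by simp; omega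
    have hi : i - (u ++ d).length < t.length := by
      have : (u ++ d).length = u.length + d.length := by simp
      omega
    have heq : cs[i]? = t[i - (u ++ d).length]? := by
      rw [hcs, ← List.append_assoc, List.getElem?_append_right h1']
    rw [List.getD_eq_getElem?_getD, heq, List.getElem?_eq_getElem hi]
    exact ht _ (List.getElem_mem hi)
  -- skip the trailing non-digit block t
  rw [loop_skip cs v pad (u.length + d.length) cs.length (by omega) ht_at]
  -- enter the loop body at the last index of d
  obtain ⟨q, hq⟩ : ∃ q, u.length + d.length = q + 1 := ⟨u.length + d.length - 1, by omega⟩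
  rw [hq, expLeftLoop]
  have hqd : ∃ c, cs[q]? = some c ∧ PySem.Chars.isdigit c = true :=
    hdig_at q (by omega) (by omega)
  obtain ⟨cq, hcq, hcqd⟩ := hqd
  rw [List.getD_eq_getElem?_getD, hcq]
  simp only [Option.getD_some, hcqd, if_true]
  -- the inner while-walk stops at u.length - 1
  have hwhile : expLeftWhile cs (cs.length + q + 2) (q : Int) = (q : Int) - d.length := by
    apply while_walk cs d.length (cs.length + q + 2) (q : Int) (by omega)
    · intro m hm
      have hcast : (q : Int) - (m : Nat) = ((q - m : Nat) : Int) := by omega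
      rw [hcast, PySem.List.pyGet?_natCast]
      exact hdig_at (q - m) (by omega) (by omega)
    · intro c hc
      by_cases huni : u = []
      · have hidx : (q : Int) - (d.length : Nat) = -1 := by
          have : u.length = 0 := by simp [huni]
          omega
        rw [hidx, PySem.List.pyGet?_neg_one] at hc
        have htne : t ≠ [] := by
          intro htnil
          apply hnall
          rw [List.all_eq_true]
          intro c' hc'
          rw [hcs, huni, htnil] at hc'
          simp at hc'
          exact hdall c' hc'
        have : cs.getLast? = t.getLast? := by
          rw [hcs, huni, List.nil_append, List.getLast?_append_of_ne_nil d htne]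
        rw [this] at hc
        obtain ⟨ys, hys⟩ := List.getLast?_eq_some_iff.mp hc
        exact ht c (by rw [hys]; simp)
      · have hupos : 0 < u.length := List.length_pos_of_ne_nil huni
        have hidx : (q : Int) - (d.length : Nat) = ((u.length - 1 : Nat) : Int) := by omega
        rw [hidx, PySem.List.pyGet?_natCast] at hc
        have hul : u.length - 1 < u.length := by omega
        have : cs[u.length - 1]? = u[u.length - 1]? := by
          rw [hcs, List.getElem?_append_left hul]
        rw [this] at hc
        simp only [List.getElem?_eq_getElem hul, Option.some.injEq] at hc
        rw [← hc]
        have hgl := hu huni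
        rwa [List.getLast_eq_getElem huni] at hgl
  rw [hwhile]
  -- reduce the three slices
  have hj1 : (q : Int) - (d.length : Nat) + 1 = ((u.length : Nat) : Int) := by omega
  have hq1 : (q : Int) + 1 = ((u.length + d.length : Nat) : Int) := by omega
  rw [hj1, hq1, PySem.List.slice_to_natCast, PySem.List.slice_natCast,
    PySem.List.slice_from_natCast]
  have htake : cs.take u.length = u := by rw [hcs, List.take_left]
  have hdrop : cs.drop u.length = d ++ t := by rw [hcs, List.drop_left]
  have hdrop2 : cs.drop (u.length + d.length) = t := by
    rw [hcs, ← List.append_assoc]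
    have : u.length + d.length = (u ++ d).length := by simp
    rw [this, List.drop_left]
  have hmid : (cs.drop u.length).take (u.length + d.length - u.length) = d := by
    rw [hdrop]
    simp
  rw [htake, hdrop2, hmid]

-- both ports reduce to the same splice (list level)
theorem main_eq (cs : List Char) (v : String) (pad : List Char)
    (hnall : ¬ (cs.all PySem.Chars.isdigit = true)) :
    expLeftLoop cs v pad cs.length =
      (match expLeftScan cs 0 none none with
       | none => cs ++ ['0']
       | some (i, j) =>
           cs.take i
             ++ PySem.Int.toChars ((PySem.Int.ofStr? (String.mk ((cs.drop i).take (j - i)))).getD 0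
                 + (PySem.Int.ofStr? v).getD 0)
             ++ cs.drop j ++ pad) := by
  by_cases hany : cs.any PySem.Chars.isdigit = true
  · -- decompose cs = u ++ d ++ t around the rightmost digit run
    have hr2ne : cs.reverse.dropWhile (fun c => !PySem.Chars.isdigit c) ≠ [] := by
      intro h
      rw [List.dropWhile_eq_nil_iff] at h
      rw [List.any_eq_true] at hany
      obtain ⟨c, hc, hcd⟩ := hany
      have := h c (by simpa using hc)
      simp [hcd] at this
    set r2 := cs.reverse.dropWhile (fun c => !PySem.Chars.isdigit c) with hr2def
    have hhead : PySem.Chars.isdigit (r2.head hr2ne) = true := by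
      have := List.head_dropWhile_not (fun c => !PySem.Chars.isdigit c) hr2ne
      simpa using this
    set t := (cs.reverse.takeWhile (fun c => !PySem.Chars.isdigit c)).reverse with htdef
    set d := (r2.takeWhile PySem.Chars.isdigit).reverse with hddef
    set u := (r2.dropWhile PySem.Chars.isdigit).reverse with hudef
    have hdecomp : cs = u ++ (d ++ t) := by
      have h1 : cs.reverse.takeWhile (fun c => !PySem.Chars.isdigit c) ++ r2 = cs.reverse :=
        List.takeWhile_append_dropWhile
      have h2 : r2.takeWhile PySem.Chars.isdigit ++ r2.dropWhile PySem.Chars.isdigit = r2 :=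
        List.takeWhile_append_dropWhile
      rw [hudef, hddef, htdef, ← List.reverse_append, ← List.reverse_append,
        List.append_assoc, h2, h1, List.reverse_reverse]
    have hdne : d ≠ [] := by
      rw [hddef]
      simp only [ne_eq, List.reverse_eq_nil_iff]
      obtain ⟨c0, r2', hr2'⟩ : ∃ c0 r2', r2 = c0 :: r2' := by
        cases hx : r2 with
        | nil => exact absurd hx hr2ne
        | cons a b => exact ⟨a, b, rfl⟩
      have hh1 : r2.head? = some c0 := by rw [hr2']; rfl
      have hh2 : r2.head? = some (r2.head hr2ne) := List.head?_eq_head hr2ne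
      have hc0 : PySem.Chars.isdigit c0 = true := by
        rw [hh1] at hh2
        rw [Option.some.inj hh2]
        exact hhead
      rw [hr2', List.takeWhile_cons, hc0]
      simp
    have hdall : ∀ c ∈ d, PySem.Chars.isdigit c = true := by
      intro c hc
      rw [hddef, List.mem_reverse] at hc
      exact List.mem_takeWhile_imp hc
    have ht : ∀ c ∈ t, PySem.Chars.isdigit c = false := by
      intro c hc
      rw [htdef, List.mem_reverse] at hc
      have := List.mem_takeWhile_imp hc
      simpa using this
    have hu : ∀ h : u ≠ [], PySem.Chars.isdigit (u.getLast h) = false := by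
      intro h
      have hne' : r2.dropWhile PySem.Chars.isdigit ≠ [] := by
        intro hx
        apply h
        rw [hudef, hx]
        rfl
      have h1 := List.head_dropWhile_not PySem.Chars.isdigit hne'
      have h2 : u.getLast? = some ((r2.dropWhile PySem.Chars.isdigit).head hne') := by
        rw [hudef, List.getLast?_reverse, List.head?_eq_head hne']
      have h3 : u.getLast? = some (u.getLast h) := List.getLast?_eq_getLast h
      rw [h2] at h3
      rw [← Option.some.inj h3]
      exact h1
    rw [hdecomp] at hnall ⊢
    rw [scan_value u d t hdne hdall ht hu, loop_value u d t v pad hdne hdall ht hu hnall]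
    have htake : (u ++ (d ++ t)).take u.length = u := List.take_left
    have hdrop : (u ++ (d ++ t)).drop u.length = d ++ t := List.drop_left
    have hdrop2 : (u ++ (d ++ t)).drop (u.length + d.length) = t := by
      rw [← List.append_assoc]
      have : u.length + d.length = (u ++ d).length := by simp
      rw [this, List.drop_left]
    simp only [htake, hdrop, hdrop2]
    have hmid : (d ++ t).take (u.length + d.length - u.length) = d := by
      simp
    rw [hmid]
  · -- no digit anywhere: both sides are cs ++ ['0']
    have hnodig : ∀ c ∈ cs, PySem.Chars.isdigit c = false := by
      intro c hc
      by_contra hcd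
      exact hany (List.any_eq_true.mpr ⟨c, hc, by simpa using hcd⟩)
    have hsk := loop_skip cs v pad 0 cs.length (by omega) (by
      intro i _ hi
      rw [List.getD_eq_getElem?_getD, List.getElem?_eq_getElem hi]
      exact hnodig _ (List.getElem_mem hi))
    rw [scan_nodigit cs hnodig 0 none, hsk]
    rfl

-- ===== VERDICT (by name: the statement is the Claim_ definition above) =====
theorem exp_left_spec : Claim_equal_exp_left := by
  intro sn v _ hpre
  obtain ⟨-, hnall, -⟩ := hpre
  unfold Spec_exp_left exp_left exp_left_alt
  simp only []
  rw [main_eq sn.toList v _ hnall]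
  cases hs : expLeftScan sn.toList 0 none none with
  | none => rfl
  | some ij => obtain ⟨i, j⟩ := ij; rfl
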